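-- pv_equiv track=rewrite | github.com/gtzigiannis/crosssecmom2 | feature_engineering_v2.py | get_family_features
-- ===== SOURCE A (Python) =====
-- from typing import Dict, Optional, Tuple, List
--
-- FACTOR_GROUPS = {
--     'momentum': {
--         'patterns': ['Close%-', 'RSI', 'Williams', 'MACD', 'ROC', 'Mom', '_lag'],
--         'target_representatives': 5,
--     },
--     'volatility': {
--         'patterns': ['std', 'vol', 'ATR', 'BBW', 'parkinson', 'garman_klass', 'rogers_satchell', 'skew', 'kurt'],
--         'target_representatives': 5,
--     },
--     'volume': {
--         'patterns': ['volume', 'rel_vol', 'obv', 'vwap', 'up_down_vol'],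
--         'target_representatives': 4,
--     },
--     'liquidity': {
--         'patterns': ['amihud', 'spread', 'kyle', 'illiq', 'roll_spread', 'cs_spread'],
--         'target_representatives': 4,
--     },
--     'trend': {
--         'patterns': ['MA', 'EMA', 'adx', 'trend_r2', 'slope', 'trend_strength', 'trend_regime'],
--         'target_representatives': 4,
--     },
--     'risk_beta': {
--         'patterns': ['beta', 'idio', 'corr_mkt', 'semi_vol', 'max_dd', 'var_', 'cvar', 'down_corr'],
--         'target_representatives': 5,
--     },
--     'macro': {
--         'patterns': ['vix', 'yc_', 'hy_spread', 'fci', 'fsi', 'claims', 'real_rate', 'credit'],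
--         'target_representatives': 5,
--     },
--     'sentiment': {
--         'patterns': ['sentiment', 'epu', 'umich', 'uncertainty'],
--         'target_representatives': 3,
--     },
--     'structure': {
--         'patterns': ['regime', 'streak', 'zscore', 'days_since', 'alignment', 'pct_from'],
--         'target_representatives': 4,
--     },
--     'cross_asset': {
--         'patterns': ['rel_strength', 'corr_tlt', 'corr_gld', 'corr_uup'],
--         'target_representatives': 3,
--     },
-- }
--
-- def classify_feature_family(feature_name: str) -> str:
--     """
--     Classify a feature into its factor family based on name patterns.
--
--     Returns family name or 'other' if no match.
--     """
--     feature_lower = feature_name.lower()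
--
--     for family, config in FACTOR_GROUPS.items():
--         for pattern in config['patterns']:
--             if pattern.lower() in feature_lower:
--                 return family
--
--     return 'other'
--
-- def get_family_features(
--     feature_columns: List[str]
-- ) -> Dict[str, List[str]]:
--     """
--     Group feature columns by factor family.
--
--     Returns dict of {family: [feature_names]}
--     """
--     families = {family: [] for family in FACTOR_GROUPS.keys()}
--     families['other'] = []
--
--     for col in feature_columns:
--         family = classify_feature_family(col)
--         families[family].append(col)
--
--     return families
-- ===== SOURCE B (Python) =====
-- # B: instead of classifying each column (inner scan over all families per column),
-- # iterate the families once, partitioning the still-unassigned columns per family.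
-- FACTOR_GROUPS = {
--     'momentum': {
--         'patterns': ['Close%-', 'RSI', 'Williams', 'MACD', 'ROC', 'Mom', '_lag'],
--         'target_representatives': 5,
--     },
--     'volatility': {
--         'patterns': ['std', 'vol', 'ATR', 'BBW', 'parkinson', 'garman_klass', 'rogers_satchell', 'skew', 'kurt'],
--         'target_representatives': 5,
--     },
--     'volume': {
--         'patterns': ['volume', 'rel_vol', 'obv', 'vwap', 'up_down_vol'],
--         'target_representatives': 4,
--     },
--     'liquidity': {
--         'patterns': ['amihud', 'spread', 'kyle', 'illiq', 'roll_spread', 'cs_spread'],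
--         'target_representatives': 4,
--     },
--     'trend': {
--         'patterns': ['MA', 'EMA', 'adx', 'trend_r2', 'slope', 'trend_strength', 'trend_regime'],
--         'target_representatives': 4,
--     },
--     'risk_beta': {
--         'patterns': ['beta', 'idio', 'corr_mkt', 'semi_vol', 'max_dd', 'var_', 'cvar', 'down_corr'],
--         'target_representatives': 5,
--     },
--     'macro': {
--         'patterns': ['vix', 'yc_', 'hy_spread', 'fci', 'fsi', 'claims', 'real_rate', 'credit'],
--         'target_representatives': 5,
--     },
--     'sentiment': {
--         'patterns': ['sentiment', 'epu', 'umich', 'uncertainty'],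
--         'target_representatives': 3,
--     },
--     'structure': {
--         'patterns': ['regime', 'streak', 'zscore', 'days_since', 'alignment', 'pct_from'],
--         'target_representatives': 4,
--     },
--     'cross_asset': {
--         'patterns': ['rel_strength', 'corr_tlt', 'corr_gld', 'corr_uup'],
--         'target_representatives': 3,
--     },
-- }
--
-- def get_family_features(feature_columns):
--     families = {}
--     remaining = list(feature_columns)
--     for family, config in FACTOR_GROUPS.items():
--         matched, rest = [], []
--         for col in remaining:
--             if any(p.lower() in col.lower() for p in config['patterns']):
--                 matched.append(col)
--             else:
--                 rest.append(col)
--         families[family] = matched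
--         remaining = rest
--     families['other'] = remaining
--     return families
-- ===== Notes on version B (the rewrite author's own statement) =====
-- stated objective: alternative
-- what changed: Instead of classifying each column by scanning all families (per-column inner loop over FACTOR_GROUPS), B iterates the families once and partitions the still-unassigned columns per family, the final leftover being 'other'.
import Mathlib
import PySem

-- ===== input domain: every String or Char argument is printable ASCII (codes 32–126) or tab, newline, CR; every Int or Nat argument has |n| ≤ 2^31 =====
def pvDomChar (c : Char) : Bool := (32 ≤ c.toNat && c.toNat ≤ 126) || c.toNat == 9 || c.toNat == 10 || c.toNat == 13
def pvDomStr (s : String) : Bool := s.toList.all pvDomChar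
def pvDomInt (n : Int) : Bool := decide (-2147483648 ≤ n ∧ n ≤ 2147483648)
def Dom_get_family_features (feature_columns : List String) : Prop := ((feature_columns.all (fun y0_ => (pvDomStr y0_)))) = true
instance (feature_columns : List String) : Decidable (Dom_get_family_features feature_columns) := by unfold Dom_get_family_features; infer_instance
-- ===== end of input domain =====

-- B partitions the remaining columns family by family instead of classifying each column; same result, different decomposition (objective: alternative).

-- ===== PORT A =====
-- FACTOR_GROUPS: family name together with its 'patterns' list (the only field used).
def pvFams : List (String × List String) :=
  [("momentum", ["Close%-", "RSI", "Williams", "MACD", "ROC", "Mom", "_lag"]),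
   ("volatility", ["std", "vol", "ATR", "BBW", "parkinson", "garman_klass", "rogers_satchell", "skew", "kurt"]),
   ("volume", ["volume", "rel_vol", "obv", "vwap", "up_down_vol"]),
   ("liquidity", ["amihud", "spread", "kyle", "illiq", "roll_spread", "cs_spread"]),
   ("trend", ["MA", "EMA", "adx", "trend_r2", "slope", "trend_strength", "trend_regime"]),
   ("risk_beta", ["beta", "idio", "corr_mkt", "semi_vol", "max_dd", "var_", "cvar", "down_corr"]),
   ("macro", ["vix", "yc_", "hy_spread", "fci", "fsi", "claims", "real_rate", "credit"]),
   ("sentiment", ["sentiment", "epu", "umich", "uncertainty"]),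
   ("structure", ["regime", "streak", "zscore", "days_since", "alignment", "pct_from"]),
   ("cross_asset", ["rel_strength", "corr_tlt", "corr_gld", "corr_uup"])]

-- the for-family / for-pattern loops of classify_feature_family (return on first match)
def pvClassifyGo : List (String × List String) → String → String
  | [], _ => "other"
  | (fam, pats) :: rest, low =>
      if pats.any (fun p => PySem.Str.isIn (PySem.Str.lower p) low) then fam
      else pvClassifyGo rest low

def classify_feature_family (feature_name : String) : String :=
  pvClassifyGo pvFams (PySem.Str.lower feature_name)

def get_family_features (feature_columns : List String) : List (String × List String) :=
  let init : PySem.Dict String (List String) :=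
    pvFams.foldl (fun d p => d.insert p.1 []) PySem.Dict.empty
  let init := init.insert "other" []
  let d := feature_columns.foldl
    (fun d col => d.modify (classify_feature_family col) [] (fun l => l ++ [col])) init
  d.items

-- ===== PORT B =====
def pvMatches (pats : List String) (col : String) : Bool :=
  pats.any (fun p => PySem.Str.isIn (PySem.Str.lower p) (PySem.Str.lower col))

-- the for-family loop of B: split `remaining` into this family's bucket and the rest
def pvAltGo : List (String × List String) → List String → List (String × List String)
  | [], remaining => [("other", remaining)]
  | (fam, pats) :: rest, remaining =>
      (fam, remaining.filter (fun c => pvMatches pats c)) ::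
        pvAltGo rest (remaining.filter (fun c => !pvMatches pats c))

def get_family_features_alt (feature_columns : List String) : List (String × List String) :=
  pvAltGo pvFams feature_columns

-- ===== PRECONDITION & SPEC =====
def Spec_get_family_features (feature_columns : List String) (out : List (String × List String)) : Prop := out = get_family_features_alt feature_columns
instance (feature_columns : List String) (out : List (String × List String)) : Decidable (Spec_get_family_features feature_columns out) := by unfold Spec_get_family_features; infer_instance

-- ===== CLAIM (what is proved, stated in full; the proofs are below) =====
def Claim_equal_get_family_features : Prop := ∀ (feature_columns : List String), Dom_get_family_features feature_columns → Spec_get_family_features feature_columns (get_family_features feature_columns)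

-- ===== LEMMAS AND PROOFS =====

-- pvClassifyGo only returns a listed family name or "other"
theorem classifyGo_mem (fams : List (String × List String)) (low : String) :
    pvClassifyGo fams low ∈ fams.map Prod.fst ++ ["other"] := by
  induction fams with
  | nil => simp [pvClassifyGo]
  | cons hd tl ih =>
    obtain ⟨fam, pats⟩ := hd
    simp only [pvClassifyGo]
    split
    · simp
    · simpa using Or.inr (by simpa using ih)

-- Set.update with elements already present is the identity
theorem set_update_of_subset {α : Type} [BEq α] [LawfulBEq α] (s : List α) (l : List α)
    (h : ∀ x ∈ l, x ∈ s) : PySem.Set.update s l = s := by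
  rw [PySem.Set.update_eq_append_filter]
  have hnil : (PySem.Set.ofList l).filter (fun y => !(PySem.Set.contains s y)) = [] := by
    apply List.filter_eq_nil_iff.2
    intro y hy
    have hyl : y ∈ l := by simpa [PySem.Set.mem_ofList] using hy
    simpa using h y hyl
  rw [hnil, List.append_nil]

-- B characterised: pvAltGo produces, per family, the columns whose first matching family it is
theorem altGo_char (fams : List (String × List String)) (rem : List String)
    (hnd : (fams.map Prod.fst).Nodup) (hoth : "other" ∉ fams.map Prod.fst) :
    pvAltGo fams rem =
      (fams.map Prod.fst).map
        (fun k => (k, rem.filter (fun c => pvClassifyGo fams (PySem.Str.lower c) == k)))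
      ++ [("other", rem.filter (fun c => pvClassifyGo fams (PySem.Str.lower c) == "other"))] := by
  induction fams generalizing rem with
  | nil =>
    simp [pvAltGo, pvClassifyGo]
  | cons hd tl ih =>
    obtain ⟨fam, pats⟩ := hd
    simp only [List.map_cons, List.nodup_cons, List.mem_cons] at hnd hoth
    have hfam_tl : fam ∉ tl.map Prod.fst := hnd.1
    have hoth_ne : fam ≠ "other" := fun h => hoth (Or.inl h.symm)
    have hcls : ∀ c : String, pvClassifyGo ((fam, pats) :: tl) (PySem.Str.lower c) =
        if pvMatches pats c then fam else pvClassifyGo tl (PySem.Str.lower c) := by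
      intro c; simp [pvClassifyGo, pvMatches]
    simp only [pvAltGo, List.map_cons, List.cons_append]
    congr 1
    · -- head bucket
      congr 1
      apply List.filter_congr
      intro c _
      rw [hcls c]
      by_cases h : pvMatches pats c = true
      · simp [h]
      · have hne : pvClassifyGo tl (PySem.Str.lower c) ≠ fam := by
          intro he
          have := classifyGo_mem tl (PySem.Str.lower c)
          rw [he] at this
          rcases List.mem_append.1 this with h1 | h1
          · exact hfam_tl h1
          · simp at h1; exact hoth_ne h1
        simp [h, hne]
    · -- tail buckets
      rw [ih (rem.filter (fun c => !pvMatches pats c))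
            (by simpa using hnd.2) (fun h => hoth (Or.inr h))]
      congr 1
      · apply List.map_congr_left
        intro k hk
        congr 1
        rw [List.filter_filter]
        apply List.filter_congr
        intro c _
        rw [hcls c]
        by_cases h : pvMatches pats c = true
        · have : fam ≠ k := fun he => hfam_tl (he ▸ hk)
          simp [h, this]
        · simp [h]
      · congr 2
        rw [List.filter_filter]
        apply List.filter_congr
        intro c _
        rw [hcls c]
        by_cases h : pvMatches pats c = true
        · simp [h, hoth_ne]
        · simp [h]

-- A characterised: the dict loop yields exactly the per-key filters over the fixed key list
set_option maxHeartbeats 2000000 in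
theorem a_char (cols : List String) :
    get_family_features cols =
      (pvFams.map Prod.fst ++ ["other"]).map
        (fun k => (k, cols.filter (fun c => classify_feature_family c == k))) := by
  classical
  simp only [get_family_features]
  set K : PySem.Dict String (List String) :=
    (pvFams.foldl (fun d p => d.insert p.1 []) PySem.Dict.empty).insert "other" [] with hK
  have hKkeys : K.keys = pvFams.map Prod.fst ++ ["other"] := by
    rw [hK]; decide
  have hKnodup : K.keys.Nodup := by rw [hKkeys]; decide
  set d := cols.foldl
    (fun d col => d.modify (classify_feature_family col) [] (fun l => l ++ [col])) K with hd
  -- keys are unchanged by the loop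
  have hloop : d = (cols.map (fun c => (classify_feature_family c, c))).foldl
      (fun d p => d.modify p.1 [] (fun l => l ++ [p.2])) K := by
    rw [hd, List.foldl_map]
  have hkeys : d.keys = K.keys := by
    rw [hd, PySem.Dict.keys_foldl_modify_key]
    apply set_update_of_subset
    intro x hx
    simp only [List.mem_map] at hx
    obtain ⟨c, _, rfl⟩ := hx
    rw [hKkeys]
    exact classifyGo_mem pvFams (PySem.Str.lower c)
  have hnodup : d.keys.Nodup := hkeys ▸ hKnodup
  have hget : ∀ k, d.getD k [] = K.getD k [] ++ cols.filter (fun c => classify_feature_family c == k) := by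
    intro k
    rw [hloop, PySem.Dict.getD_foldl_modify_append]
    congr 1
    rw [List.filter_map, List.map_map]
    simp [Function.comp_def]
  rw [PySem.Dict.items_eq_map_keys d hnodup [], hkeys, hKkeys]
  apply List.map_congr_left
  intro k hk
  rw [hget k]
  have hK0 : K.getD k [] = [] := by
    rw [hK]
    simp only [pvFams, List.foldl_cons, List.foldl_nil]
    simp only [PySem.Dict.getD_insert, PySem.Dict.getD_empty]
    split_ifs <;> rfl
  rw [hK0, List.nil_append]

-- ===== VERDICT (by name: the statement is the Claim_ definition above) =====
theorem get_family_features_spec : Claim_equal_get_family_features := by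
  intro cols _
  unfold Spec_get_family_features
  rw [a_char, get_family_features_alt,
    altGo_char pvFams cols (by decide) (by decide)]
  simp only [List.map_append, List.map_map]
  rfl
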